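-- pv_equiv track=rewrite | github.com/fauzaanirsyaadi/Programming-Test | answer_no_3.py | fibonacci_sum
-- ===== SOURCE A (Python) =====
-- def fibonacci_sum(x, y, n):
--     if n < 3:
--         return 0, 0
--
--     fib = [x, y]
--     even_sum = 0
--     odd_sum = y
--
--     for i in range(2, n):
--         fib_i = fib[i-1] + fib[i-2]
--         if fib_i % 2 == 0:
--             even_sum += fib_i
--         else:
--             odd_sum += fib_i
--         fib.append(fib_i)
--
--     return even_sum, odd_sum
-- ===== SOURCE B (Python) =====
-- def fibonacci_sum(x, y, n):
--     # Closed form: parity of the Gibonacci sequence is periodic with period 3,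
--     # and sums of every third term telescope; terms are computed by fast-doubling
--     # Fibonacci in O(log n) big-int operations instead of A's O(n) additions.
--     if n < 3:
--         return 0, 0
--
--     def fib_pair(k):
--         # (F(k), F(k+1)) for the standard Fibonacci F(0)=0, F(1)=1, by fast doubling
--         if k == 0:
--             return 0, 1
--         a, b = fib_pair(k // 2)
--         c = a * (2 * b - a)
--         d = a * a + b * b
--         if k % 2 == 0:
--             return c, d
--         return d, c + d
--
--     def g(m):
--         # m >= 1: the m-th term of the sequence G(0)=x, G(1)=y, G(i)=G(i-1)+G(i-2)
--         f0, f1 = fib_pair(m - 1)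
--         return x * f0 + y * f1
--
--     m = n - 1                      # index of the last generated term
--     total = g(n + 1) - x - 2 * y   # sum of G(2..m), by telescoping
--
--     def s(r0):
--         # sum of G(i) for i in [2..m] with i ≡ r0 (mod 3); r0 in {2,3,4} is the
--         # first such index; 2*sum telescopes to G(last+2) - G(r0-1)
--         if m < r0:
--             return 0
--         k = (m - r0) // 3 + 1
--         return (g(r0 + 3 * k - 1) - g(r0 - 1)) // 2
--
--     px, py = x % 2, y % 2
--     if px == 0 and py == 0:
--         even_sum = total           # every term is even
--     elif px == 1 and py == 1:
--         even_sum = s(2)            # even exactly at i ≡ 2 (mod 3)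
--     elif px == 0:
--         even_sum = s(3)            # even exactly at i ≡ 0 (mod 3)
--     else:
--         even_sum = s(4)            # even exactly at i ≡ 1 (mod 3)
--
--     return even_sum, (total - even_sum) + y
-- ===== Notes on version B (the rewrite author's own statement) =====
-- stated objective: faster
-- what changed: Replaces A's term-by-term loop (which also keeps the whole list of terms) by a closed form: the parity of a Gibonacci sequence is periodic with period 3, sums of every third term telescope to (G(last+2)-G(first-1))/2, and the needed terms are computed by fast-doubling Fibonacci, so B does O(log n) big-int multiplications instead of A's n big-int additions.
import Mathlib
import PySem

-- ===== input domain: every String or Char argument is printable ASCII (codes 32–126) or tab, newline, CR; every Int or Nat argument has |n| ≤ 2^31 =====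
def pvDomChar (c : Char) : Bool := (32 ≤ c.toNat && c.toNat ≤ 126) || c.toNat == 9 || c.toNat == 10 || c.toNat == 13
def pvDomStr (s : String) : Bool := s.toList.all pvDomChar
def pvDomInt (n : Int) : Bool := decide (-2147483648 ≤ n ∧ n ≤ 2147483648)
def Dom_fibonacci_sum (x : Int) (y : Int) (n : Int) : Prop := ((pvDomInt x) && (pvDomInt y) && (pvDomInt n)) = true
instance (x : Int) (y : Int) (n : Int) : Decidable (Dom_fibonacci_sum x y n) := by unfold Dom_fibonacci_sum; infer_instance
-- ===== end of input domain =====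

-- B replaces A's term-by-term accumulation loop with a period-3 parity analysis plus
-- telescoping closed forms evaluated via fast-doubling Fibonacci (measured asymptotically faster).


-- ===== PORT A =====
-- loop body of A's 'for i in range(2, n)': state is (fib, even_sum, odd_sum)
def fibStepA (st : List Int × Int × Int) (i : Int) : List Int × Int × Int :=
  let fib := st.1
  let even_sum := st.2.1
  let odd_sum := st.2.2
  -- fib[i-1] + fib[i-2]; indices are always in range here, so getD 0 is exact
  let fib_i := ((PySem.List.pyGet? fib (i - 1)).getD 0) + ((PySem.List.pyGet? fib (i - 2)).getD 0)
  if PySem.Int.mod fib_i 2 = 0 then (fib ++ [fib_i], even_sum + fib_i, odd_sum)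
  else (fib ++ [fib_i], even_sum, odd_sum + fib_i)

def fibonacci_sum (x : Int) (y : Int) (n : Int) : List Int :=
  if n < 3 then [0, 0]
  else
    let r := (PySem.List.pyRange 2 n 1).foldl fibStepA ([x, y], 0, y)
    [r.2.1, r.2.2]

-- ===== PORT B =====
-- (F(k), F(k+1)) for standard Fibonacci, by fast doubling (Source B's fib_pair)
def fibPairB (k : Nat) : Int × Int :=
  if h : k = 0 then (0, 1)
  else
    let p := fibPairB (k / 2)
    let a := p.1
    let b := p.2
    let c := a * (2 * b - a)
    let d := a * a + b * b
    if k % 2 = 0 then (c, d) else (d, c + d)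
decreasing_by exact Nat.div_lt_self (Nat.pos_of_ne_zero h) (by omega)

-- Source B's g(m): the m-th term of G(0)=x, G(1)=y; called only with m ≥ 1, so toNat is exact
def gB (x : Int) (y : Int) (m : Int) : Int :=
  let p := fibPairB (m - 1).toNat
  x * p.1 + y * p.2

-- Source B's s(r0): sum of G(i), i in [2..m], i ≡ r0 (mod 3), via the telescoped closed form
def sB (x : Int) (y : Int) (m : Int) (r0 : Int) : Int :=
  if m < r0 then 0
  else
    let k := PySem.Int.floordiv (m - r0) 3 + 1
    PySem.Int.floordiv (gB x y (r0 + 3 * k - 1) - gB x y (r0 - 1)) 2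

def fibonacci_sum_alt (x : Int) (y : Int) (n : Int) : List Int :=
  if n < 3 then [0, 0]
  else
    let m := n - 1
    let total := gB x y (n + 1) - x - 2 * y
    let px := PySem.Int.mod x 2
    let py := PySem.Int.mod y 2
    let even_sum :=
      if px = 0 ∧ py = 0 then total
      else if px = 1 ∧ py = 1 then sB x y m 2
      else if px = 0 then sB x y m 3
      else sB x y m 4
    [even_sum, (total - even_sum) + y]

-- ===== PRECONDITION & SPEC =====
def Spec_fibonacci_sum (x : Int) (y : Int) (n : Int) (out : List Int) : Prop := out = fibonacci_sum_alt x y n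
instance (x : Int) (y : Int) (n : Int) (out : List Int) : Decidable (Spec_fibonacci_sum x y n out) := by unfold Spec_fibonacci_sum; infer_instance

-- ===== CLAIM (what is proved, stated in full; the proofs are below) =====
def Claim_equal_fibonacci_sum : Prop := ∀ (x : Int) (y : Int) (n : Int), Dom_fibonacci_sum x y n → Spec_fibonacci_sum x y n (fibonacci_sum x y n)

-- ===== LEMMAS AND PROOFS =====

-- the mathematical Gibonacci sequence both programs are about
def G (x : Int) (y : Int) : Nat → Int
  | 0 => x
  | 1 => y
  | (k + 2) => G x y k + G x y (k + 1)

-- even-valued and odd-valued partial sums over the generated terms G(2), ..., G(m+1)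
def Esum (x : Int) (y : Int) (m : Nat) : Int :=
  ∑ i ∈ Finset.range m, (if G x y (i + 2) % 2 = 0 then G x y (i + 2) else 0)
def Osum (x : Int) (y : Int) (m : Nat) : Int :=
  ∑ i ∈ Finset.range m, (if G x y (i + 2) % 2 = 0 then 0 else G x y (i + 2))

-- number of indices i in [2..m+1] with i ≡ r0 (mod 3), for r0 ∈ {2,3,4}
def pvCnt (r0 : Nat) (m : Nat) : Nat := if m + 1 < r0 then 0 else (m + 1 - r0) / 3 + 1

theorem G_add_three (x y : Int) (k : Nat) : G x y (k + 3) = 2 * G x y (k + 1) + G x y k := by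
  show G x y (k + 1 + 2) = _
  rw [G, G]
  ring

theorem G_mod_three (x y : Int) (k : Nat) : G x y k % 2 = G x y (k % 3) % 2 := by
  induction k using Nat.strong_induction_on with
  | _ k ih =>
    match k, ih with
    | 0, _ => rfl
    | 1, _ => rfl
    | 2, _ => rfl
    | (j+3), ih =>
      rw [G_add_three, show (j+3) % 3 = j % 3 by omega, ← ih j (by omega)]
      omega

theorem G_fib (x y : Int) (k : Nat) :
    G x y (k + 1) = x * Nat.fib k + y * Nat.fib (k + 1) := by
  induction k using Nat.strong_induction_on with
  | _ k ih =>
    match k, ih with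
    | 0, _ => simp [G]
    | 1, _ =>
      show G x y 2 = _
      rw [G]
      show x + G x y 1 = _
      simp [G, Nat.fib]
    | (j+2), ih =>
      show G x y (j+1+2) = _
      rw [G, ih j (by omega), ih (j+1) (by omega)]
      have h2 : (Nat.fib (j+2+1) : Int) = Nat.fib (j+1) + Nat.fib (j+1+1) := by
        rw [show j+2+1 = (j+1)+2 from rfl, Nat.fib_add_two]
        push_cast
        ring
      have h3 : (Nat.fib (j+2) : Int) = Nat.fib j + Nat.fib (j+1) := by
        rw [Nat.fib_add_two]
        push_cast
        ring
      rw [h2, h3]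
      ring

theorem total_eq (x y : Int) (m : Nat) :
    (∑ i ∈ Finset.range m, G x y (i + 2)) = G x y (m + 3) - x - 2 * y := by
  induction m with
  | zero => show (0:Int) = G x y 3 - x - 2*y; show (0:Int) = G x y (1+2) - x - 2*y; rw [G]; show (0:Int) = y + G x y 2 - x - 2*y; rw [G]; show (0:Int) = y + (x + y) - x - 2*y; ring
  | succ m ih =>
    rw [Finset.sum_range_succ, ih]
    have h1 : G x y (m+1+3) = G x y (m+2) + G x y (m+3) := by
      rw [show m+1+3 = m+2+2 from rfl, G, show m+2+1 = m+3 from rfl]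
    rw [h1, show m+3 = m+1+2 from rfl, G]
    ring

theorem tele (x y : Int) (t k : Nat) :
    2 * (∑ j ∈ Finset.range k, G x y (t + 1 + 3 * j)) = G x y (t + 3 * k) - G x y t := by
  induction k with
  | zero => simp
  | succ k ih =>
    rw [Finset.sum_range_succ, show t + 3 * (k+1) = (t + 3*k) + 3 by ring, G_add_three]
    rw [mul_add, ih, show t + 1 + 3 * k = t + 3*k + 1 by ring]
    ring

theorem fibPairB_eq (k : Nat) : fibPairB k = ((Nat.fib k : Int), (Nat.fib (k + 1) : Int)) := by
  induction k using Nat.strong_induction_on with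
  | _ k ih =>
    by_cases hk0 : k = 0
    · subst hk0; rw [fibPairB]; simp
    · rw [fibPairB]
      rw [dif_neg hk0]
      have ihm := ih (k / 2) (Nat.div_lt_self (Nat.pos_of_ne_zero hk0) (by omega))
      set m := k / 2 with hm
      have h0 : Nat.fib m ≤ Nat.fib (m + 1) := Nat.fib_mono (by omega)
      have hle : Nat.fib m ≤ 2 * Nat.fib (m + 1) := by omega
      have e1 : (Nat.fib (2 * m) : Int)
          = (Nat.fib m : Int) * (2 * (Nat.fib (m + 1) : Int) - (Nat.fib m : Int)) := by
        rw [Nat.fib_two_mul, Nat.cast_mul, Nat.cast_sub hle]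
        push_cast
        ring
      have e2 : (Nat.fib (2 * m + 1) : Int)
          = (Nat.fib m : Int) * (Nat.fib m : Int)
            + (Nat.fib (m + 1) : Int) * (Nat.fib (m + 1) : Int) := by
        rw [Nat.fib_two_mul_add_one]
        push_cast
        ring
      simp only [ihm]
      by_cases hpar : k % 2 = 0
      · rw [if_pos hpar]
        have hk : k = 2 * m := by omega
        rw [hk, e1, e2]
      · rw [if_neg hpar]
        have hk : k = 2 * m + 1 := by omega
        have e3 : (Nat.fib (2 * m + 1 + 1) : Int)
            = (Nat.fib (2 * m) : Int) + (Nat.fib (2 * m + 1) : Int) := by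
          rw [show 2 * m + 1 + 1 = 2 * m + 2 from rfl, Nat.fib_add_two]
          push_cast
          ring
        rw [hk, e3, e1, e2]

theorem gB_eq (x y : Int) (m : Int) (h : 1 ≤ m) : gB x y m = G x y m.toNat := by
  obtain ⟨s, hs⟩ : ∃ s : Nat, m.toNat = s + 1 := ⟨m.toNat - 1, by omega⟩
  have hm1 : (m - 1).toNat = s := by omega
  rw [gB, hm1, fibPairB_eq, hs, G_fib]

theorem EO_total (x y : Int) (m : Nat) :
    Esum x y m + Osum x y m = ∑ i ∈ Finset.range m, G x y (i + 2) := by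
  rw [Esum, Osum, ← Finset.sum_add_distrib]
  apply Finset.sum_congr rfl
  intro i _
  split_ifs <;> ring

theorem filt (x y : Int) (r0 m : Nat) (h2 : 2 ≤ r0) (h4 : r0 ≤ 4)
    (hcond : ∀ i : Nat, (G x y (i + 2) % 2 = 0) ↔ (i + 2) % 3 = r0 % 3) :
    Esum x y m = ∑ j ∈ Finset.range (pvCnt r0 m), G x y (r0 + 3 * j) := by
  induction m with
  | zero =>
    rw [show pvCnt r0 0 = 0 by unfold pvCnt; split_ifs <;> omega]
    simp [Esum]
  | succ m ih =>
    rw [Esum, Finset.sum_range_succ, ← Esum]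
    by_cases hc : (m + 2) % 3 = r0 % 3
    · rw [if_pos ((hcond m).mpr hc)]
      have hcnt : pvCnt r0 (m + 1) = pvCnt r0 m + 1 := by
        unfold pvCnt; split_ifs <;> omega
      have hidx : r0 + 3 * pvCnt r0 m = m + 2 := by
        unfold pvCnt; split_ifs <;> omega
      rw [hcnt, Finset.sum_range_succ, hidx, ih]
    · rw [if_neg (fun h => hc ((hcond m).mp h))]
      have hcnt : pvCnt r0 (m + 1) = pvCnt r0 m := by
        unfold pvCnt; split_ifs <;> omega
      rw [hcnt, add_zero, ih]

theorem sB_eq (x y : Int) (m r0 : Nat) (h2 : 2 ≤ r0) (h4 : r0 ≤ 4) :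
    sB x y ((m : Int) + 1) (r0 : Int) = ∑ j ∈ Finset.range (pvCnt r0 m), G x y (r0 + 3 * j) := by
  by_cases hlt : ((m : Int) + 1) < (r0 : Int)
  · rw [sB, if_pos hlt, show pvCnt r0 m = 0 by unfold pvCnt; split_ifs <;> omega]
    simp
  · simp only [sB, if_neg hlt]
    set c := pvCnt r0 m with hc
    have hcval : c = (m + 1 - r0) / 3 + 1 := by rw [hc]; unfold pvCnt; split_ifs <;> omega
    have hk : PySem.Int.floordiv (((m : Int) + 1) - (r0 : Int)) 3 + 1 = (c : Int) := by
      rw [PySem.Int.floordiv_eq_ediv_of_pos (by omega)]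
      omega
    rw [hk]
    have hg1 : gB x y ((r0 : Int) + 3 * (c : Int) - 1) = G x y (r0 - 1 + 3 * c) := by
      rw [gB_eq x y _ (by omega), show ((r0 : Int) + 3 * (c : Int) - 1).toNat = r0 - 1 + 3 * c by omega]
    have hg2 : gB x y ((r0 : Int) - 1) = G x y (r0 - 1) := by
      rw [gB_eq x y _ (by omega), show ((r0 : Int) - 1).toNat = r0 - 1 by omega]
    rw [hg1, hg2, ← tele x y (r0 - 1) c]
    have hsum : ∑ j ∈ Finset.range c, G x y (r0 - 1 + 1 + 3 * j)
        = ∑ j ∈ Finset.range c, G x y (r0 + 3 * j) := by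
      apply Finset.sum_congr rfl
      intro j _
      congr 1
      omega
    rw [hsum, PySem.Int.floordiv_eq_ediv_of_pos (by omega), Int.mul_ediv_cancel_left _ (by omega)]

theorem loopA (x y : Int) (m : Nat) :
    (PySem.List.pyRange 2 (2 + (m : Int)) 1).foldl fibStepA ([x, y], 0, y)
      = ((List.range (m + 2)).map (G x y), Esum x y m, y + Osum x y m) := by
  induction m with
  | zero =>
    rw [show (2 + ((0 : Nat) : Int)) = 2 by norm_num, PySem.List.pyRange_one_eq_nil le_rfl]
    simp [Esum, Osum, List.range_succ]
    constructor
    · rfl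
    · rfl
  | succ m ih =>
    rw [show (2 + ((m + 1 : Nat) : Int)) = (2 + (m : Int)) + 1 by push_cast; ring,
        PySem.List.pyRange_one_succ_right (by omega), List.foldl_append, ih]
    simp only [List.foldl_cons, List.foldl_nil]
    have hg1 : PySem.List.pyGet? ((List.range (m + 2)).map (G x y)) ((2 + (m : Int)) - 1)
        = some (G x y (m + 1)) := by
      rw [show (2 + (m : Int)) - 1 = ((m + 1 : Nat) : Int) by push_cast; ring,
          PySem.List.pyGet?_natCast]
      simp
    have hg2 : PySem.List.pyGet? ((List.range (m + 2)).map (G x y)) ((2 + (m : Int)) - 2)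
        = some (G x y m) := by
      rw [show (2 + (m : Int)) - 2 = ((m : Nat) : Int) by ring,
          PySem.List.pyGet?_natCast]
      simp
    have hfib : G x y (m + 1) + G x y m = G x y (m + 2) := by rw [G]; ring
    have hmod : PySem.Int.mod (G x y (m + 2)) 2 = G x y (m + 2) % 2 :=
      PySem.Int.mod_eq_emod_of_pos (by omega)
    rw [fibStepA]
    simp only [hg1, hg2, Option.getD_some, hfib, hmod]
    have hlist : (List.range (m + 2)).map (G x y) ++ [G x y (m + 2)]
        = (List.range (m + 1 + 2)).map (G x y) := by
      rw [show m + 1 + 2 = (m + 2) + 1 from rfl]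
      conv_rhs => rw [List.range_succ, List.map_append]
      rw [List.map_singleton]
    have hE : Esum x y (m + 1)
        = Esum x y m + (if G x y (m + 2) % 2 = 0 then G x y (m + 2) else 0) := by
      rw [Esum, Finset.sum_range_succ, ← Esum]
    have hO : Osum x y (m + 1)
        = Osum x y m + (if G x y (m + 2) % 2 = 0 then 0 else G x y (m + 2)) := by
      rw [Osum, Finset.sum_range_succ, ← Osum]
    by_cases hpar : G x y (m + 2) % 2 = 0
    · rw [if_pos hpar, hlist, hE, hO, if_pos hpar, if_pos hpar]
      simp
    · rw [if_neg hpar, hlist, hE, hO, if_neg hpar, if_neg hpar]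
      simp [add_assoc]

-- parity of every term, in each of the four parity classes of (x, y)
theorem hall_even (x y : Int) (hx : x % 2 = 0) (hy : y % 2 = 0) (k : Nat) :
    G x y k % 2 = 0 := by
  rw [G_mod_three]
  have h3 : k % 3 = 0 ∨ k % 3 = 1 ∨ k % 3 = 2 := by omega
  rcases h3 with h | h | h <;> rw [h] <;> simp [G] <;> omega

theorem hcond_of (x y : Int) (r0 : Nat) (hr : r0 = 2 ∧ x % 2 = 1 ∧ y % 2 = 1
      ∨ r0 = 3 ∧ x % 2 = 0 ∧ y % 2 = 1 ∨ r0 = 4 ∧ x % 2 = 1 ∧ y % 2 = 0) :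
    ∀ i : Nat, (G x y (i + 2) % 2 = 0) ↔ (i + 2) % 3 = r0 % 3 := by
  intro i
  rw [G_mod_three]
  have h3 : (i + 2) % 3 = 0 ∨ (i + 2) % 3 = 1 ∨ (i + 2) % 3 = 2 := by omega
  rcases hr with ⟨hr, hx, hy⟩ | ⟨hr, hx, hy⟩ | ⟨hr, hx, hy⟩ <;> subst hr <;>
    rcases h3 with h | h | h <;> rw [h] <;> simp [G] <;> omega

-- ===== VERDICT (by name: the statement is the Claim_ definition above) =====
theorem fibonacci_sum_spec : Claim_equal_fibonacci_sum := by
  intro x y n _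
  unfold Spec_fibonacci_sum
  by_cases hn : n < 3
  · rw [fibonacci_sum, fibonacci_sum_alt, if_pos hn, if_pos hn]
  · set m : Nat := (n - 2).toNat with hmdef
    have hm : n = 2 + (m : Int) := by omega
    have hA : fibonacci_sum x y n = [Esum x y m, y + Osum x y m] := by
      rw [fibonacci_sum, if_neg hn, hm, loopA]
    have htot : gB x y (n + 1) = G x y (m + 3) := by
      rw [gB_eq x y _ (by omega), show (n + 1).toNat = m + 3 by omega]
    have hEO : y + Osum x y m = (G x y (m + 3) - x - 2 * y) - Esum x y m + y := by
      have h := EO_total x y m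
      rw [total_eq] at h
      linarith
    have hS : ∀ r0 : Nat, 2 ≤ r0 → r0 ≤ 4 →
        sB x y (n - 1) (r0 : Int) = ∑ j ∈ Finset.range (pvCnt r0 m), G x y (r0 + 3 * j) := by
      intro r0 ha hb
      rw [show (n - 1 : Int) = ((m : Int) + 1) by omega]
      exact sB_eq x y m r0 ha hb
    simp only [fibonacci_sum_alt, if_neg hn, htot,
      PySem.Int.mod_eq_emod_of_pos (show (0:Int) < 2 by omega)]
    have hx2 : x % 2 = 0 ∨ x % 2 = 1 := by omega
    have hy2 : y % 2 = 0 ∨ y % 2 = 1 := by omega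
    rcases hx2 with hx | hx <;> rcases hy2 with hy | hy
    · -- x even, y even: every term is even
      have hEs : Esum x y m = G x y (m + 3) - x - 2 * y := by
        rw [Esum, ← total_eq x y m]
        apply Finset.sum_congr rfl
        intro i _
        rw [if_pos (hall_even x y hx hy (i + 2))]
      rw [hA, if_pos ⟨hx, hy⟩, hEO, hEs]
    · -- x even, y odd: even exactly at i ≡ 0 (mod 3), first index 3
      have hEs : Esum x y m = sB x y (n - 1) 3 := by
        have h := hS 3 (by omega) (by omega)
        rw [show (((3:Nat)) : Int) = (3 : Int) by norm_num] at h
        rw [filt x y 3 m (by omega) (by omega) (hcond_of x y 3 (by tauto)), ← h]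
      rw [hA, if_neg (by omega), if_neg (by omega), if_pos hx, hEO, hEs]
    · -- x odd, y even: even exactly at i ≡ 1 (mod 3), first index 4
      have hEs : Esum x y m = sB x y (n - 1) 4 := by
        have h := hS 4 (by omega) (by omega)
        rw [show (((4:Nat)) : Int) = (4 : Int) by norm_num] at h
        rw [filt x y 4 m (by omega) (by omega) (hcond_of x y 4 (by tauto)), ← h]
      rw [hA, if_neg (by omega), if_neg (by omega), if_neg (by omega), hEO, hEs]
    · -- x odd, y odd: even exactly at i ≡ 2 (mod 3), first index 2
      have hEs : Esum x y m = sB x y (n - 1) 2 := by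
        have h := hS 2 (by omega) (by omega)
        rw [show (((2:Nat)) : Int) = (2 : Int) by norm_num] at h
        rw [filt x y 2 m (by omega) (by omega) (hcond_of x y 2 (by tauto)), ← h]
      rw [hA, if_neg (by omega), if_pos ⟨hx, hy⟩, hEO, hEs]
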